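-- pv_equiv track=rewrite | github.com/Tomosius/atlas | src/atlas/core/scanner.py | _read_toml_section
-- ===== SOURCE A (Python) =====
-- def _read_toml_section(content: str, section: str) -> str:
--     """Extract the text of a TOML section (between its header and the next header).
--
--     Args:
--         content: Full TOML file content as a string.
--         section: Section header to find, e.g. ``"[tool.ruff]"``.
--
--     Returns:
--         The text between the section header and the next ``[`` header,
--         or an empty string if the section is not found.
--     """
--     lines = content.splitlines()
--     section_stripped = section.strip()
--     inside = False
--     result: list[str] = []
--
--     for line in lines:
--         stripped = line.strip()
--         if stripped == section_stripped:
--             inside = True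
--             continue
--         if inside:
--             # Stop at the next section header (but not array-of-tables like [[x]])
--             if stripped.startswith("[") and not stripped.startswith("[["):
--                 break
--             result.append(line)
--
--     return "\n".join(result)
-- ===== SOURCE B (Python) =====
-- def _read_toml_section(content: str, section: str) -> str:
--     lines = content.splitlines()
--     try:
--         start = [line.strip() for line in lines].index(section.strip())
--     except ValueError:
--         return ""
--     # global index of all section-header cut points ([x] but not [[x]])
--     boundaries = [
--         i for i, line in enumerate(lines)
--         if line.strip().startswith("[") and not line.strip().startswith("[[")
--     ]
--     end = min((b for b in boundaries if b > start), default=len(lines))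
--     return "\n".join(lines[start + 1:end])
-- ===== Notes on version B (the rewrite author's own statement) =====
-- stated objective: alternative
-- what changed: Replaces A's stateful inside-flag scan by staged global indexing: locate the header with list.index on the stripped lines, precompute the list of ALL section-boundary indices in the file, pick the minimal boundary after the header, and return a slice of the line list.
-- outside the precondition, e.g. on _read_toml_section('[s]\na\n[s]\nb', '[s]'): A returns 'a\nb', B returns 'a'; on _read_toml_section('x\na\nx\nb', 'x'): A returns 'a\nb', B returns 'a\nx\nb'
import Mathlib
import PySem

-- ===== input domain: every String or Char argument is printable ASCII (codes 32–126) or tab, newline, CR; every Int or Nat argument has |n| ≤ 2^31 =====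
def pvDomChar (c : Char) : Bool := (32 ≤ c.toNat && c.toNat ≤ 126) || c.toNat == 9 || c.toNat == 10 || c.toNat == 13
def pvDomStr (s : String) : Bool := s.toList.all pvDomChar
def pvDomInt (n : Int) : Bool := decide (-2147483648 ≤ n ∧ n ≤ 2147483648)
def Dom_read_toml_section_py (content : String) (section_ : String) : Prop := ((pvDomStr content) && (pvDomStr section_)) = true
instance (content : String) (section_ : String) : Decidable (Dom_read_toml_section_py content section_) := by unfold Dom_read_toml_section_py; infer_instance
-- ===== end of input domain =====

-- B replaces A's stateful inside-flag scan by staged global indexing: list.index of the stripped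
-- header, a precomputed list of ALL boundary indices, the minimal boundary after the header, and a
-- slice of the line list (objective: alternative decomposition, same cost).

-- ===== PORT A =====
-- the for-loop of A: state = (inside, result in reverse); `break` and end-of-list return result.reverse
def readTomlLoopA (sectionStripped : String) : List String → Bool → List String → List String
  | [], _, result => result.reverse
  | line :: rest, inside, result =>
    let stripped := PySem.Str.strip line
    if stripped = sectionStripped then
      readTomlLoopA sectionStripped rest true result
    else if inside then
      if PySem.Str.startswith stripped "[" && !(PySem.Str.startswith stripped "[[") then
        result.reverse
      else
        readTomlLoopA sectionStripped rest inside (line :: result)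
    else
      readTomlLoopA sectionStripped rest inside result

def read_toml_section_py (content : String) (section_ : String) : String :=
  PySem.Str.join "\n"
    (readTomlLoopA (PySem.Str.strip section_) (PySem.Str.splitlines content) false [])

-- ===== PORT B =====
def readTomlBoundaryB (line : String) : Bool :=
  PySem.Str.startswith (PySem.Str.strip line) "[" &&
    !(PySem.Str.startswith (PySem.Str.strip line) "[[")

def read_toml_section_py_alt (content : String) (section_ : String) : String :=
  let lines := PySem.Str.splitlines content
  -- [line.strip() for line in lines].index(section.strip()) — ValueError caught as none
  match PySem.List.index? (lines.map PySem.Str.strip) (PySem.Str.strip section_) with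
  | none => ""
  | some start =>
    let boundaries : List Int :=
      ((PySem.List.enumerate lines).filter (fun pr => readTomlBoundaryB pr.2)).map (fun pr => pr.1)
    let e : Int :=
      (PySem.List.min? (boundaries.filter (fun b => decide ((start : Int) < b))) id).getD
        (lines.length : Int)
    PySem.Str.join "\n" (PySem.List.slice lines (some ((start : Int) + 1)) (some e))

-- ===== PRECONDITION & SPEC =====
-- Pre_ excludes contents whose stripped section header occurs on more than one line: there A's
-- equality-before-boundary check accidentally skips the duplicate line and stays inside the section,
-- a defensible-corner artefact on invalid TOML (duplicate headers) that B does not reproduce.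
def Pre_read_toml_section_py (content : String) (section_ : String) : Prop :=
  ((PySem.Str.splitlines content).countP
    (fun l => PySem.Str.strip l = PySem.Str.strip section_)) ≤ 1
instance (content : String) (section_ : String) : Decidable (Pre_read_toml_section_py content section_) := by
  unfold Pre_read_toml_section_py; infer_instance

def pvWitness_read_toml_section_py : String × String := ("[tool]\na = 1\n[next]\nb = 2", "[tool]")

def Spec_read_toml_section_py (content : String) (section_ : String) (out : String) : Prop :=
  out = read_toml_section_py_alt content section_
instance (content : String) (section_ : String) (out : String) : Decidable (Spec_read_toml_section_py content section_ out) := by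
  unfold Spec_read_toml_section_py; infer_instance

-- ===== CLAIM (what is proved, stated in full; the proofs are below) =====
def Claim_equal_read_toml_section_py : Prop :=
  ∀ (content : String) (section_ : String), Dom_read_toml_section_py content section_ →
    Pre_read_toml_section_py content section_ →
    Spec_read_toml_section_py content section_ (read_toml_section_py content section_)

-- ===== LEMMAS AND PROOFS =====

-- once inside with no further header occurrence, A's loop is acc.reverse ++ takeWhile-not-boundary
lemma loopA_inside (t : String) (ls : List String) (acc : List String)
    (h : ∀ l ∈ ls, PySem.Str.strip l ≠ t) :
    readTomlLoopA t ls true acc = acc.reverse ++ ls.takeWhile (fun l => !readTomlBoundaryB l) := by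
  induction ls generalizing acc with
  | nil => simp [readTomlLoopA]
  | cons line rest ih =>
    have hne : PySem.Str.strip line ≠ t := h line (by simp)
    have h' : ∀ l ∈ rest, PySem.Str.strip l ≠ t := fun l hl => h l (by simp [hl])
    show (if PySem.Str.strip line = t then readTomlLoopA t rest true acc
      else if true = true then
        if readTomlBoundaryB line then acc.reverse
        else readTomlLoopA t rest true (line :: acc)
      else readTomlLoopA t rest true acc) = _
    rw [if_neg hne, if_pos rfl, List.takeWhile_cons]
    by_cases hb : readTomlBoundaryB line
    · rw [if_pos hb, hb]; simp
    · rw [if_neg hb, ih _ h', Bool.not_eq_true] at *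
      rw [hb]; simp

-- A's whole loop, characterised through the first index whose stripped line is the target
lemma loopA_eq_find (t : String) (ls : List String)
    (hpre : ls.countP (fun l => PySem.Str.strip l = t) ≤ 1) :
    PySem.Str.join "\n" (readTomlLoopA t ls false []) =
      (match ls.findIdx? (fun l => PySem.Str.strip l = t) with
       | none => ""
       | some i => PySem.Str.join "\n" ((ls.drop (i + 1)).takeWhile (fun l => !readTomlBoundaryB l))) := by
  induction ls with
  | nil => simp [readTomlLoopA]; decide
  | cons line rest ih =>
    by_cases hm : PySem.Str.strip line = t
    · -- header found at the head; rest contains no further occurrence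
      have hrest : ∀ l ∈ rest, PySem.Str.strip l ≠ t := by
        intro l hl hlt
        have h1 : 0 < rest.countP (fun l => decide (PySem.Str.strip l = t)) :=
          List.countP_pos_iff.mpr ⟨l, hl, by simp [hlt]⟩
        have h2 : (line :: rest).countP (fun l => decide (PySem.Str.strip l = t)) =
            rest.countP (fun l => decide (PySem.Str.strip l = t)) + 1 := by
          simp [hm]
        omega
      have hfind : (line :: rest).findIdx? (fun l => PySem.Str.strip l = t) = some 0 := by
        simp [List.findIdx?_cons, hm]
      have hA : readTomlLoopA t (line :: rest) false [] = readTomlLoopA t rest true [] := by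
        show (if PySem.Str.strip line = t then readTomlLoopA t rest true []
          else if false = true then
            if readTomlBoundaryB line then ([] : List String).reverse
            else readTomlLoopA t rest false [line]
          else readTomlLoopA t rest false []) = _
        rw [if_pos hm]
      rw [hA, loopA_inside t rest [] hrest, hfind]
      simp
    · -- head is not the header: both sides reduce to the tail
      have hpre' : rest.countP (fun l => PySem.Str.strip l = t) ≤ 1 := by
        rw [List.countP_cons] at hpre; omega
      have hA : readTomlLoopA t (line :: rest) false [] = readTomlLoopA t rest false [] := by
        show (if PySem.Str.strip line = t then readTomlLoopA t rest true []
          else if false = true then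
            if readTomlBoundaryB line then ([] : List String).reverse
            else readTomlLoopA t rest false [line]
          else readTomlLoopA t rest false []) = _
        rw [if_neg hm, if_neg (by simp)]
      have hfind : (line :: rest).findIdx? (fun l => PySem.Str.strip l = t)
          = (rest.findIdx? (fun l => PySem.Str.strip l = t)).map (· + 1) := by
        simp [List.findIdx?_cons, hm]
      rw [hA, ih hpre', hfind]
      cases rest.findIdx? (fun l => PySem.Str.strip l = t) with
      | none => simp
      | some i => simp [List.drop_succ_cons]

-- B-side stage 1: list.index over the stripped lines is findIdx? of the stripped-equality predicate
lemma index?_map_strip (t : String) (ls : List String) :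
    PySem.List.index? (ls.map PySem.Str.strip) t
      = ls.findIdx? (fun l => PySem.Str.strip l = t) := by
  rw [PySem.List.index?_eq_idxOf?]
  simp only [List.idxOf?, List.findIdx?_map, Function.comp_def]
  congr 1


-- takeWhile of the negation is take up to findIdx
lemma takeWhile_not_eq_take_findIdx {α : Type} (q : α → Bool) (xs : List α) :
    xs.takeWhile (fun x => !q x) = xs.take (xs.findIdx q) := by
  induction xs with
  | nil => simp
  | cons x l ih => by_cases h : q x <;> simp [List.findIdx_cons, h, ih]

-- membership in B's filtered boundary-index list
lemma mem_boundary_filter_iff (ls : List String) (i : Nat) (b : Int) :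
    (b ∈ ((((PySem.List.enumerate ls).filter (fun pr => readTomlBoundaryB pr.2)).map
        (fun pr => pr.1)).filter (fun b => decide ((i : Int) < b))))
      ↔ ∃ (k : Nat) (h : k < ls.length), b = (k : Int) ∧ i < k ∧ readTomlBoundaryB ls[k] := by
  simp only [List.mem_filter, List.mem_map, PySem.List.mem_enumerate_iff, decide_eq_true_eq]
  constructor
  · rintro ⟨⟨pr, ⟨⟨k, hk, rfl⟩, hb⟩, rfl⟩, hlt⟩
    exact ⟨k, hk, by simp, by exact_mod_cast (by simpa using hlt), by simpa using hb⟩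
  · rintro ⟨k, hk, rfl, hik, hbk⟩
    exact ⟨⟨((k : Int), ls[k]), ⟨⟨k, hk, by simp⟩, hbk⟩, rfl⟩, by exact_mod_cast hik⟩

-- B's minimal boundary after the header equals the header index + 1 + findIdx on the dropped tail
set_option maxHeartbeats 2000000 in
lemma min_boundary_eq (ls : List String) (i : Nat) (hi : i < ls.length) :
    ((PySem.List.min? ((((PySem.List.enumerate ls).filter (fun pr => readTomlBoundaryB pr.2)).map
        (fun pr => pr.1)).filter (fun b => decide ((i : Int) < b))) id).getD (ls.length : Int))
      = ((i + 1 + (ls.drop (i + 1)).findIdx readTomlBoundaryB : Nat) : Int) := by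
  set E := ((((PySem.List.enumerate ls).filter (fun pr => readTomlBoundaryB pr.2)).map
      (fun pr => pr.1)).filter (fun b => decide ((i : Int) < b))) with hE
  cases hf : (ls.drop (i + 1)).findIdx? readTomlBoundaryB with
  | none =>
    -- no boundary after the header: E is empty and findIdx is the length of the tail
    have hnone : ∀ x ∈ ls.drop (i + 1), readTomlBoundaryB x = false :=
      List.findIdx?_eq_none_iff.mp hf
    have hEnil : E = [] := by
      rw [List.eq_nil_iff_forall_not_mem]
      intro b hb
      obtain ⟨k, hk, rfl, hik, hbk⟩ := (mem_boundary_filter_iff ls i b).mp hb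
      have hk' : k - (i + 1) < (ls.drop (i + 1)).length := by
        rw [List.length_drop]; omega
      have hgl : (ls.drop (i + 1))[k - (i + 1)]'hk' = ls[k]'hk := by
        rw [List.getElem_drop]; congr 1; omega
      have hfalse := hnone _ (List.getElem_mem hk')
      rw [hgl] at hfalse
      rw [hfalse] at hbk
      exact Bool.false_ne_true hbk
    have hlen : (ls.drop (i + 1)).findIdx readTomlBoundaryB = ls.length - (i + 1) := by
      have hl := List.findIdx_eq_length.mpr hnone
      simpa using hl
    have hmnil : PySem.List.min? ([] : List Int) id = none :=
      (PySem.List.min?_eq_none_iff _ _).mpr rfl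
    rw [hEnil, hmnil, hlen, Option.getD_none]
    omega
  | some d =>
    obtain ⟨hd, hpd, hmin⟩ := List.findIdx?_eq_some_iff_getElem.mp hf
    have hdidx : (ls.drop (i + 1)).findIdx readTomlBoundaryB = d :=
      (List.findIdx?_eq_some_iff_findIdx_eq.mp hf).2
    have hdlen : i + 1 + d < ls.length := by
      rw [List.length_drop] at hd; omega
    have hjmem : ((i + 1 + d : Nat) : Int) ∈ E := by
      rw [hE, mem_boundary_filter_iff]
      refine ⟨i + 1 + d, hdlen, rfl, by omega, ?_⟩
      have hgl : (ls.drop (i + 1))[d]'hd = ls[i + 1 + d]'hdlen := by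
        rw [List.getElem_drop]
      rwa [hgl] at hpd
    obtain ⟨m, hm⟩ : ∃ m, PySem.List.min? E id = some m := by
      cases h : PySem.List.min? E id with
      | none =>
        rw [PySem.List.min?_eq_none_iff _ _] at h
        rw [h] at hjmem
        exact absurd hjmem (List.not_mem_nil)
      | some m => exact ⟨m, rfl⟩
    have hmem := PySem.List.min?_mem hm
    have hle : m ≤ ((i + 1 + d : Nat) : Int) := PySem.List.min?_isMin hm _ hjmem
    obtain ⟨km, hkm, rfl, hikm, hbkm⟩ := (mem_boundary_filter_iff ls i m).mp hmem
    have hge : i + 1 + d ≤ km := by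
      by_contra hc
      push Not at hc
      have hkm2 : km - (i + 1) < d := by omega
      have hkmlen : km - (i + 1) < (ls.drop (i + 1)).length := by
        rw [List.length_drop]; omega
      have hgl : (ls.drop (i + 1))[km - (i + 1)]'hkmlen = ls[km]'hkm := by
        rw [List.getElem_drop]; congr 1; omega
      exact hmin _ hkm2 (by rw [hgl]; exact hbkm)
    have hkmeq : km = i + 1 + d := by
      have hle2 : (km : Int) ≤ ((i + 1 + d : Nat) : Int) := hle
      omega
    rw [hm, hdidx, hkmeq, Option.getD_some]

-- zeta-reduced form of port B (definitional)
lemma alt_def (content section_ : String) :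
    read_toml_section_py_alt content section_ =
      match PySem.List.index? (((PySem.Str.splitlines content)).map PySem.Str.strip)
          (PySem.Str.strip section_) with
      | none => ""
      | some start =>
        PySem.Str.join "\n" (PySem.List.slice (PySem.Str.splitlines content)
          (some ((start : Int) + 1))
          (some ((PySem.List.min?
            (((((PySem.List.enumerate (PySem.Str.splitlines content)).filter
                (fun pr => readTomlBoundaryB pr.2)).map (fun pr => pr.1)).filter
                (fun b => decide ((start : Int) < b)))) id).getD
            (((PySem.Str.splitlines content).length : Int))))) := rfl

-- ===== VERDICT (by name: the statement is the Claim_ definition above) =====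
theorem read_toml_section_py_spec : Claim_equal_read_toml_section_py := by
  intro content section_ _ hpre
  unfold Spec_read_toml_section_py read_toml_section_py
  rw [alt_def, index?_map_strip, loopA_eq_find _ _ hpre]
  cases hf : (PySem.Str.splitlines content).findIdx? (fun l => PySem.Str.strip l = PySem.Str.strip section_) with
  | none => rfl
  | some i =>
    have hi : i < (PySem.Str.splitlines content).length :=
      (List.findIdx?_eq_some_iff_findIdx_eq.mp hf).1
    simp only
    rw [min_boundary_eq _ i hi]
    have hcast : ((i : Int) + 1) = ((i + 1 : Nat) : Int) := by push_cast; ring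
    rw [hcast, PySem.List.slice_natCast]
    rw [takeWhile_not_eq_take_findIdx]
    congr 2
    omega
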